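-- pv_equiv track=rewrite | github.com/kvrkr866/rcm_denial_proto | src/rcm_denial/tools/eob_ocr_tool.py | _map_artifact_source
-- ===== SOURCE A (Python) =====
-- def _map_artifact_source(
--     summary: str,
--     major_code: str,
--     minor_code: str,
-- ) -> tuple[str, str]:
--     """
--     Map what's missing to WHERE to find it.
--     Returns (primary_source, fallback_source).
--     """
--     s = summary.lower()
--
--     # Medical records, reports, clinical docs → EHR first, then PMS
--     if any(kw in s for kw in [
--         "medical record", "operative report", "pathology report",
--         "clinical documentation", "chart notes",
--     ]):
--         return "EHR", "PMS"
--
--     # Provider identifier, NPI → PMS first, then EHR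
--     if any(kw in s for kw in [
--         "provider identifier", "referring provider", "provider npi",
--     ]):
--         return "PMS", "EHR"
--
--     # Authorization, precertification → PMS first, then EHR
--     if any(kw in s for kw in [
--         "authorization", "precertification", "auth reference",
--     ]):
--         return "PMS", "EHR"
--
--     # Policy, eligibility, coordination → Payer Portal
--     if any(kw in s for kw in [
--         "eligibility", "coordination", "policy", "coverage",
--     ]):
--         return "Payer Portal", "PMS"
--
--     # Additional documentation (generic CO-252) → EHR first
--     if "documentation" in s or "additional" in s:
--         return "EHR", "PMS"
--
--     # Claim information incomplete (CO-16) → PMS first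
--     if "information" in s or "incomplete" in s:
--         return "PMS", "EHR"
--
--     # Default
--     return "EHR", "PMS"
-- ===== SOURCE B (Python) =====
-- # B: flat keyword->priority list; collect ALL matching priorities in one pass, then pick min priority.
-- _KEYWORDS = [
--     ("medical record", 0), ("operative report", 0), ("pathology report", 0),
--     ("clinical documentation", 0), ("chart notes", 0),
--     ("provider identifier", 1), ("referring provider", 1), ("provider npi", 1),
--     ("authorization", 2), ("precertification", 2), ("auth reference", 2),
--     ("eligibility", 3), ("coordination", 3), ("policy", 3), ("coverage", 3),
--     ("documentation", 4), ("additional", 4),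
--     ("information", 5), ("incomplete", 5),
-- ]
-- _RESULTS = [
--     ("EHR", "PMS"), ("PMS", "EHR"), ("PMS", "EHR"),
--     ("Payer Portal", "PMS"), ("EHR", "PMS"), ("PMS", "EHR"),
-- ]
--
-- def _map_artifact_source(summary: str, major_code: str, minor_code: str) -> tuple[str, str]:
--     s = summary.lower()
--     hits = [pri for kw, pri in _KEYWORDS if kw in s]
--     return _RESULTS[min(hits)] if hits else ("EHR", "PMS")
-- ===== Notes on version B (the rewrite author's own statement) =====
-- stated objective: alternative
-- what changed: Replaces A's first-match if-cascade with a flat keyword-to-priority list scanned in one full pass collecting all matching priorities, selecting the result by the minimum matched priority (no short-circuit, priority encoded as data).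
import Mathlib
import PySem

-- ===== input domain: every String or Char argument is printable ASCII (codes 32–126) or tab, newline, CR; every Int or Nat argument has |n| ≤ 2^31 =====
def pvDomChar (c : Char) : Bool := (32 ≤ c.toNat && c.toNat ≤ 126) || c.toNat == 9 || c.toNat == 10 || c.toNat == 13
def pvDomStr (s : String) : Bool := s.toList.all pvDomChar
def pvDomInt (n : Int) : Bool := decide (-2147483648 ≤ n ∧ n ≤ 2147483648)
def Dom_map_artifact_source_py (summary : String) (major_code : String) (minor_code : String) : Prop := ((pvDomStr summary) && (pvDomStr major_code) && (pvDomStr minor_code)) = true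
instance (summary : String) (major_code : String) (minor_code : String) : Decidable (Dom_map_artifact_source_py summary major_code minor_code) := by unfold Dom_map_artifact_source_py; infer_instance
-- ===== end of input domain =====

-- B replaces A's first-match if-cascade by a flat keyword→priority list: one pass collecting
-- ALL matching priorities, then the minimum priority selects the result (simpler decomposition).

-- ===== PORT A =====
-- literal transliteration of A's if-chain
def map_artifact_source_py (summary : String) (major_code : String) (minor_code : String) : String × String :=
  let s := PySem.Str.lower summary
  if ["medical record", "operative report", "pathology report",
      "clinical documentation", "chart notes"].any (fun kw => PySem.Str.isIn kw s) then
    ("EHR", "PMS")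
  else if ["provider identifier", "referring provider", "provider npi"].any
      (fun kw => PySem.Str.isIn kw s) then
    ("PMS", "EHR")
  else if ["authorization", "precertification", "auth reference"].any
      (fun kw => PySem.Str.isIn kw s) then
    ("PMS", "EHR")
  else if ["eligibility", "coordination", "policy", "coverage"].any
      (fun kw => PySem.Str.isIn kw s) then
    ("Payer Portal", "PMS")
  else if PySem.Str.isIn "documentation" s || PySem.Str.isIn "additional" s then
    ("EHR", "PMS")
  else if PySem.Str.isIn "information" s || PySem.Str.isIn "incomplete" s then
    ("PMS", "EHR")
  else
    ("EHR", "PMS")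

-- ===== PORT B =====
-- Source B's flat keyword → priority list (_KEYWORDS)
def pvKeywords : List (String × Nat) :=
  [ ("medical record", 0), ("operative report", 0), ("pathology report", 0),
    ("clinical documentation", 0), ("chart notes", 0),
    ("provider identifier", 1), ("referring provider", 1), ("provider npi", 1),
    ("authorization", 2), ("precertification", 2), ("auth reference", 2),
    ("eligibility", 3), ("coordination", 3), ("policy", 3), ("coverage", 3),
    ("documentation", 4), ("additional", 4),
    ("information", 5), ("incomplete", 5) ]

-- Source B's priority → result table (_RESULTS)
def pvResults : List (String × String) :=
  [ ("EHR", "PMS"), ("PMS", "EHR"), ("PMS", "EHR"),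
    ("Payer Portal", "PMS"), ("EHR", "PMS"), ("PMS", "EHR") ]

-- collect all matching priorities, take min(hits); the .getD default only totalises the
-- in-range list indexing _RESULTS[min(hits)]
def map_artifact_source_py_alt (summary : String) (major_code : String) (minor_code : String) : String × String :=
  let s := PySem.Str.lower summary
  let hits := (pvKeywords.filter (fun p => PySem.Str.isIn p.1 s)).map Prod.snd
  match PySem.List.min? hits (fun x => x) with
  | some g => (PySem.List.pyGet? pvResults (g : Int)).getD ("EHR", "PMS")
  | none => ("EHR", "PMS")

-- ===== PRECONDITION & SPEC =====
def Spec_map_artifact_source_py (summary : String) (major_code : String) (minor_code : String) (out : String × String) : Prop := out = map_artifact_source_py_alt summary major_code minor_code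
instance (summary : String) (major_code : String) (minor_code : String) (out : String × String) : Decidable (Spec_map_artifact_source_py summary major_code minor_code out) := by unfold Spec_map_artifact_source_py; infer_instance

-- ===== CLAIM (what is proved, stated in full; the proofs are below) =====
def Claim_equal_map_artifact_source_py : Prop := ∀ (summary : String) (major_code : String) (minor_code : String), Dom_map_artifact_source_py summary major_code minor_code → Spec_map_artifact_source_py summary major_code minor_code (map_artifact_source_py summary major_code minor_code)

-- ===== LEMMAS AND PROOFS =====

-- a fold of min over elements all ≥ k stays at k
theorem pv_foldl_min_const {t : List Nat} {k : Nat} (h : ∀ x ∈ t, k ≤ x) :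
    t.foldl min k = k := by
  induction t with
  | nil => rfl
  | cons a t ih =>
      have : min k a = k := Nat.min_eq_left (h a (by simp))
      simp only [List.foldl_cons, this]
      exact ih (fun x hx => h x (by simp [hx]))

-- peel one priority group off the front of the flat keyword list:
-- min over the hits equals "this group matched → its priority, else recurse on the rest"
theorem pv_min_group (kws : List String) (k : Nat) (rest : List (String × Nat))
    (P : String × Nat → Bool) (hk : ∀ q ∈ rest, k ≤ q.2) :
    PySem.List.min? (((kws.map (fun w => (w, k)) ++ rest).filter P).map Prod.snd) (fun x => x)
      = if kws.any (fun w => P (w, k)) then some k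
        else PySem.List.min? (((rest.filter P).map Prod.snd)) (fun x => x) := by
  induction kws with
  | nil => simp only [List.map_nil, List.nil_append, List.any_nil, Bool.false_eq_true, if_false]
  | cons w ws ih =>
      by_cases hw : P (w, k) = true
      · have htail : ∀ x ∈ ((ws.map (fun w => (w, k)) ++ rest).filter P).map Prod.snd, k ≤ x := by
          intro x hx
          simp only [List.mem_map, List.mem_filter, List.mem_append] at hx
          obtain ⟨q, ⟨hq, _⟩, rfl⟩ := hx
          rcases hq with ⟨w', _, rfl⟩ | hq
          · exact le_refl k
          · exact hk q hq
        simp only [List.map_cons, List.cons_append, List.filter_cons, hw, if_true, List.map_cons,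
          List.any_cons, Bool.true_or]
        rw [PySem.List.min?_id_cons, pv_foldl_min_const htail]
      · rw [Bool.not_eq_true] at hw
        simp only [List.map_cons, List.cons_append, List.filter_cons, hw, Bool.false_eq_true,
          if_false, List.any_cons, Bool.false_or]
        exact ih

-- ===== VERDICT (by name: the statement is the Claim_ definition above) =====
theorem map_artifact_source_py_spec : Claim_equal_map_artifact_source_py := by
  intro summary major_code minor_code _
  unfold Spec_map_artifact_source_py
  simp only [map_artifact_source_py, map_artifact_source_py_alt]
  rw [show pvKeywords =
      (["medical record", "operative report", "pathology report",
        "clinical documentation", "chart notes"].map (fun w => (w, 0)) ++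
      (["provider identifier", "referring provider", "provider npi"].map (fun w => (w, 1)) ++
      (["authorization", "precertification", "auth reference"].map (fun w => (w, 2)) ++
      (["eligibility", "coordination", "policy", "coverage"].map (fun w => (w, 3)) ++
      (["documentation", "additional"].map (fun w => (w, 4)) ++
      (["information", "incomplete"].map (fun w => (w, 5)) ++ ([] : List (String × Nat)))))))) from rfl]
  rw [pv_min_group _ 0 _ _ (by decide), pv_min_group _ 1 _ _ (by decide),
      pv_min_group _ 2 _ _ (by decide), pv_min_group _ 3 _ _ (by decide),
      pv_min_group _ 4 _ _ (by decide), pv_min_group _ 5 _ _ (by decide)]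
  simp only [List.any_cons, List.any_nil, List.filter_nil, List.map_nil, Bool.or_false]
  split_ifs <;> rfl
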